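-- pv_equiv track=rewrite | github.com/ben5736/Algorithms | python/problems/str_encode.py | encode_segment
-- ===== SOURCE A (Python) =====
-- _DELIMITER = ';'
--
-- _ESCAPER = ':'
--
-- def encode_segment(segment):
--   ret = ''
--   for c in segment:
--     if c == _DELIMITER:
--       ret += _ESCAPER + _DELIMITER
--     elif c == _ESCAPER:
--       ret += _ESCAPER + _ESCAPER
--     else:
--       ret += c
--   return ret
-- ===== SOURCE B (Python) =====
-- _DELIMITER = ';'
--
-- _ESCAPER = ':'
--
-- def encode_segment(segment):
--   return segment.replace(_ESCAPER, _ESCAPER + _ESCAPER).replace(_DELIMITER, _ESCAPER + _DELIMITER)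
-- ===== Notes on version B (the rewrite author's own statement) =====
-- stated objective: idiomatic
-- what changed: Replaces the char-by-char loop with branching appends by two whole-string str.replace substitutions (double every escaper first, then escape every delimiter).
import Mathlib
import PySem

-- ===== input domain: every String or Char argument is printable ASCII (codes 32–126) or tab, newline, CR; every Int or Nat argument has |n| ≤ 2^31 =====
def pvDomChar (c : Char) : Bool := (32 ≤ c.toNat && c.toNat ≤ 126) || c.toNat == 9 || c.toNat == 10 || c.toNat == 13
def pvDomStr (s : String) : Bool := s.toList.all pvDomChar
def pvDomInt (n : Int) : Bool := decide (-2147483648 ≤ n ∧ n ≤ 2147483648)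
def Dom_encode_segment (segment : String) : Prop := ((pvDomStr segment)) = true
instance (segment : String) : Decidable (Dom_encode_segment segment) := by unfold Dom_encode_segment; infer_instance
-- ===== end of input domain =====

-- B replaces A's char-by-char loop by two sequential global substitutions (double ':' first, then ';' → ':;'); idiomatic, same return value.


-- ===== PORT A =====
-- literal port of A's loop: fold over the characters, appending to the accumulator `ret`
def encode_segment (segment : String) : String :=
  segment.toList.foldl
    (fun ret c =>
      if c = ';' then ret ++ (":" ++ ";")
      else if c = ':' then ret ++ (":" ++ ":")
      else ret ++ String.ofList [c])
    ""

-- ===== PORT B =====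
-- literal port of B: two sequential str.replace calls
def encode_segment_alt (segment : String) : String :=
  PySem.Str.replace (PySem.Str.replace segment ":" (":" ++ ":")) ";" (":" ++ ";")

-- ===== PRECONDITION & SPEC =====
def Spec_encode_segment (segment : String) (out : String) : Prop := out = encode_segment_alt segment
instance (segment : String) (out : String) : Decidable (Spec_encode_segment segment out) := by unfold Spec_encode_segment; infer_instance

-- ===== CLAIM (what is proved, stated in full; the proofs are below) =====
def Claim_equal_encode_segment : Prop := ∀ (segment : String), Dom_encode_segment segment → Spec_encode_segment segment (encode_segment segment)

-- ===== LEMMAS AND PROOFS =====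

-- single-character replace is a flatMap
theorem replace_go_single (a : Char) (new : List Char) :
    ∀ (fuel : Nat) (l acc : List Char), l.length ≤ fuel →
      PySem.Chars.replace.go [a] new fuel l acc
        = acc.reverse ++ l.flatMap (fun c => if c = a then new else [c]) := by
  intro fuel
  induction fuel with
  | zero =>
      intro l acc h
      have : l = [] := List.length_eq_zero_iff.mp (Nat.le_zero.mp h)
      subst this
      simp [PySem.Chars.replace.go]
  | succ n ih =>
      intro l acc h
      cases l with
      | nil => simp [PySem.Chars.replace.go]
      | cons c t =>
          by_cases hc : c = a
          · subst hc
            simp only [PySem.Chars.replace.go, List.isPrefixOf, BEq.rfl, Bool.true_and, if_true,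
              List.length_cons, List.length_nil, List.drop_succ_cons, List.drop_zero,
              List.flatMap_cons]
            rw [ih t _ (Nat.le_of_succ_le_succ h)]
            simp
          · have hb : (a == c) = false := beq_eq_false_iff_ne.mpr (fun hh => hc hh.symm)
            simp only [PySem.Chars.replace.go, List.isPrefixOf, hb, Bool.false_and,
              Bool.false_eq_true, if_false, List.flatMap_cons, if_neg hc]
            rw [ih t _ (Nat.le_of_succ_le_succ h)]
            simp

theorem replace_single (s : List Char) (a : Char) (new : List Char) :
    PySem.Chars.replace s [a] new = s.flatMap (fun c => if c = a then new else [c]) := by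
  simp only [PySem.Chars.replace, List.isEmpty, Bool.false_eq_true, if_false]
  exact replace_go_single a new s.length s [] (le_refl _)

-- A's fold, characterised as a flatMap
theorem encode_segment_toList_aux (l : List Char) (ret : String) :
    (l.foldl
      (fun ret c =>
        if c = ';' then ret ++ (":" ++ ";")
        else if c = ':' then ret ++ (":" ++ ":")
        else ret ++ String.ofList [c]) ret).toList
    = ret.toList ++ l.flatMap
        (fun c => if c = ';' then [':', ';'] else if c = ':' then [':', ':'] else [c]) := by
  induction l generalizing ret with
  | nil => simp
  | cons c t ih =>
      rw [List.foldl_cons, List.flatMap_cons]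
      by_cases h1 : c = ';'
      · subst h1; rw [if_pos rfl, if_pos rfl, ih]; simp
      · by_cases h2 : c = ':'
        · subst h2; rw [if_neg h1, if_pos rfl, if_neg h1, if_pos rfl, ih]; simp
        · rw [if_neg h1, if_neg h2, if_neg h1, if_neg h2, ih]; simp

-- ===== VERDICT (by name: the statement is the Claim_ definition above) =====
theorem encode_segment_spec : Claim_equal_encode_segment := by
  intro segment _
  unfold Spec_encode_segment encode_segment encode_segment_alt
  apply String.toList_injective
  rw [PySem.Str.toList_replace, PySem.Str.toList_replace,
      encode_segment_toList_aux segment.toList ""]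
  have h1 : (":" : String).toList = [':'] := rfl
  have h2 : (";" : String).toList = [';'] := rfl
  have h3 : (":" ++ ":" : String).toList = [':', ':'] := rfl
  have h4 : (":" ++ ";" : String).toList = [':', ';'] := rfl
  rw [h1, h2, h3, h4, replace_single, replace_single, List.flatMap_assoc]
  simp only [String.toList_empty, List.nil_append]
  apply List.flatMap_congr
  intro c _
  by_cases hc1 : c = ';'
  · subst hc1; simp
  · by_cases hc2 : c = ':'
    · subst hc2; simp
    · simp [hc1, hc2]
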